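-- pv_equiv track=rewrite | github.com/fingers53/CortiXGames | scoring.py | calculate_streak_penalty
-- ===== SOURCE A (Python) =====
-- from typing import Dict, List
--
-- def calculate_streak_penalty(answer_record: List[Dict]):
--     """Calculate penalty based on streaks of incorrect answers."""
--     max_streak = 0
--     current_streak = 0
--
--     for answer in answer_record:
--         if not answer.get("isCorrect", False):
--             current_streak += 1
--             max_streak = max(max_streak, current_streak)
--         else:
--             current_streak = 0
--
--     return max_streak if max_streak > 1 else 0
-- ===== SOURCE B (Python) =====
-- def calculate_streak_penalty(answer_record):
--     """Penalty = largest gap between consecutive correct answers (boundary-index method)."""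
--     n = len(answer_record)
--     bounds = [-1]
--     for i, answer in enumerate(answer_record):
--         if answer.get("isCorrect", False):
--             bounds.append(i)
--     bounds.append(n)
--     m = max(b - a - 1 for a, b in zip(bounds, bounds[1:]))
--     return m if m > 1 else 0
-- ===== Notes on version B (the rewrite author's own statement) =====
-- stated objective: alternative
-- what changed: Instead of sweeping with running max/current streak counters, B records the boundary indices of the correct answers (with -1 and len sentinels) and computes the largest gap between consecutive boundaries minus one, then applies the same >1 guard.
import Mathlib
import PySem

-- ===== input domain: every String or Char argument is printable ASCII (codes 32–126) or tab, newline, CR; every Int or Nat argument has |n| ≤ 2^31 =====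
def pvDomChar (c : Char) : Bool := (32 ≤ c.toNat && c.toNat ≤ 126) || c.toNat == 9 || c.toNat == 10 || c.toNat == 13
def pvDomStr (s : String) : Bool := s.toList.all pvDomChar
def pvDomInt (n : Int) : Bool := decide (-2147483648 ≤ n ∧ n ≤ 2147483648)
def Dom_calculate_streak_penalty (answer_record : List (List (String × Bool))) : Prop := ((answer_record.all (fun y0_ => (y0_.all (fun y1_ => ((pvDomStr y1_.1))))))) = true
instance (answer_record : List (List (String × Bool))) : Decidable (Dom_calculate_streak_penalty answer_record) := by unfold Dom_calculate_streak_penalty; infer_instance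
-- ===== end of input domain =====

-- B replaces A's running max/current-streak counter sweep by a boundary-index method:
-- collect the indices of the correct answers (with -1 and len(record) sentinels) and
-- take the largest gap between consecutive boundaries minus one; same O(n) cost.

-- answer.get("isCorrect", False): first-match association-list lookup with default
def pvIsCorrect (answer : List (String × Bool)) : Bool :=
  (List.lookup "isCorrect" answer).getD false

-- ===== PORT A =====
def calculate_streak_penalty (answer_record : List (List (String × Bool))) : Int :=
  let st := answer_record.foldl
    (fun (p : Int × Int) answer =>
      if !(pvIsCorrect answer) then (max p.1 (p.2 + 1), p.2 + 1) else (p.1, 0))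
    (0, 0)
  if st.1 > 1 then st.1 else 0

-- ===== PORT B =====
def calculate_streak_penalty_alt (answer_record : List (List (String × Bool))) : Int :=
  let n : Int := answer_record.length
  -- bounds = [-1]; for i, answer in enumerate(...): if correct: bounds.append(i)
  let bounds : List Int :=
    (PySem.List.enumerate answer_record).foldl
      (fun acc p => if pvIsCorrect p.2 then acc ++ [p.1] else acc) [-1]
  let bounds := bounds ++ [n]
  -- m = max(b - a - 1 for a, b in zip(bounds, bounds[1:]))  (bounds has ≥ 2 elements)
  let gaps := (bounds.zip bounds.tail).map (fun p => p.2 - p.1 - 1)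
  let m := match gaps with
    | [] => 0            -- unreachable: bounds always has at least two elements
    | g :: gs => gs.foldl max g
  if m > 1 then m else 0

-- ===== PRECONDITION & SPEC =====
def Spec_calculate_streak_penalty (answer_record : List (List (String × Bool))) (out : Int) : Prop := out = calculate_streak_penalty_alt answer_record
instance (answer_record : List (List (String × Bool))) (out : Int) : Decidable (Spec_calculate_streak_penalty answer_record out) := by unfold Spec_calculate_streak_penalty; infer_instance

-- ===== CLAIM (what is proved, stated in full; the proofs are below) =====
def Claim_equal_calculate_streak_penalty : Prop := ∀ (answer_record : List (List (String × Bool))), Dom_calculate_streak_penalty answer_record → Spec_calculate_streak_penalty answer_record (calculate_streak_penalty answer_record)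

-- ===== LEMMAS AND PROOFS =====

-- proof-side reference: lengths of the maximal runs of `true` (incorrect) flags
def pvTrueRuns : List Bool → Int → List Int
  | [], cur => if cur = 0 then [] else [cur]
  | b :: rest, cur =>
      if b then pvTrueRuns rest (cur + 1)
      else (if cur = 0 then [] else [cur]) ++ pvTrueRuns rest 0

-- proof-side reference: indices (from offset k) of correct answers, recursively
def pvCorrIdx : List Bool → Int → List Int
  | [], _ => []
  | b :: rest, k => if b then pvCorrIdx rest (k + 1) else k :: pvCorrIdx rest (k + 1)

def pvGapsOf (l : List Int) : List Int := (l.zip l.tail).map (fun p => p.2 - p.1 - 1)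

def pvMaxList : List Int → Int
  | [] => 0
  | g :: gs => gs.foldl max g

theorem pvFoldlMaxMax (l : List Int) (a b : Int) :
    l.foldl max (max a b) = max a (l.foldl max b) := by
  induction l generalizing b with
  | nil => rfl
  | cons x xs ih => simpa [max_assoc] using ih (max b x)

theorem pvMaxList_cons_cons (x y : Int) (r : List Int) :
    pvMaxList (x :: y :: r) = max x (pvMaxList (y :: r)) := by
  simp only [pvMaxList, List.foldl_cons]
  exact pvFoldlMaxMax r x y

theorem pvGapsOf_cons_cons (a b : Int) (r : List Int) :
    pvGapsOf (a :: b :: r) = (b - a - 1) :: pvGapsOf (b :: r) := by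
  simp [pvGapsOf]

theorem pvGapsOf_cons_append (a b : Int) (l : List Int) :
    ∃ y r, pvGapsOf (a :: (l ++ [b])) = y :: r := by
  cases l with
  | nil => exact ⟨b - a - 1, [], by simp [pvGapsOf]⟩
  | cons c cr => exact ⟨c - a - 1, pvGapsOf (c :: (cr ++ [b])), by simp [pvGapsOf]⟩

theorem pvInitLeFoldlMax (l : List Int) (a : Int) : a ≤ l.foldl max a := by
  induction l generalizing a with
  | nil => simp
  | cons x xs ih => exact le_trans (le_max_left a x) (ih _)

theorem pvLeFoldlTrueRuns (bs : List Bool) (cur : Int) (h0 : 0 ≤ cur) :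
    cur ≤ (pvTrueRuns bs cur).foldl max 0 := by
  induction bs generalizing cur with
  | nil =>
    by_cases h : cur = 0
    · simp [pvTrueRuns, h]
    · simp [pvTrueRuns, h]
  | cons b rest ih =>
    by_cases hb : b
    · have := ih (cur + 1) (by omega)
      simp only [pvTrueRuns, hb, if_true]
      omega
    · have h2 := ih 0 le_rfl
      by_cases h : cur = 0
      · simp [pvTrueRuns, hb, h]; omega
      · have : (pvTrueRuns (b :: rest) cur).foldl max 0
            = max cur ((pvTrueRuns rest 0).foldl max 0) := by
          simp only [pvTrueRuns, hb, Bool.false_eq_true, if_false, h, List.foldl_append,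
            List.foldl_cons, List.foldl_nil]
          rw [max_comm (0 : Int) cur, pvFoldlMaxMax]
        omega

-- A's loop computes max ms (max run length, from current streak cs)
theorem pvLoopEq (bs : List Bool) (ms cs : Int) (h0 : 0 ≤ cs) (h1 : cs ≤ ms) :
    (bs.foldl (fun (p : Int × Int) b =>
        if b then (max p.1 (p.2 + 1), p.2 + 1) else (p.1, 0)) (ms, cs)).1
      = max ms ((pvTrueRuns bs cs).foldl max 0) := by
  induction bs generalizing ms cs with
  | nil =>
    by_cases h : cs = 0 <;> simp [pvTrueRuns, h] <;> omega
  | cons b rest ih =>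
    by_cases hb : b
    · have hih := ih (max ms (cs + 1)) (cs + 1) (by omega) (by omega)
      have hge := pvLeFoldlTrueRuns rest (cs + 1) (by omega)
      simp only [List.foldl_cons, hb, if_true, pvTrueRuns]
      rw [hih]
      omega
    · have hih := ih ms 0 le_rfl (by omega)
      by_cases h : cs = 0
      · simp only [List.foldl_cons, hb, Bool.false_eq_true, if_false, pvTrueRuns, h]
        simpa using hih
      · simp only [List.foldl_cons, hb, Bool.false_eq_true, if_false, pvTrueRuns, h,
          List.foldl_append, List.foldl_nil]
        rw [hih, max_comm (0 : Int) cs, pvFoldlMaxMax]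
        omega

-- B's max-gap over the sentinel boundary list = max over the true-run lengths
theorem pvGapEq (bs : List Bool) (k last : Int) (hk : last < k) :
    pvMaxList (pvGapsOf (last :: (pvCorrIdx bs k ++ [k + bs.length])))
      = (pvTrueRuns bs (k - last - 1)).foldl max 0 := by
  induction bs generalizing k last with
  | nil =>
    by_cases h : k - last - 1 = 0
    · simp [pvCorrIdx, pvGapsOf, pvMaxList, pvTrueRuns, h]
    · simp [pvCorrIdx, pvGapsOf, pvMaxList, pvTrueRuns, h]
      omega
  | cons b rest ih =>
    by_cases hb : b
    · have hih := ih (k + 1) last (by omega)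
      simp only [pvCorrIdx, hb, if_true, pvTrueRuns, List.length_cons]
      rw [show ((k : Int) + ((rest.length : Nat) + 1 : Nat)) = k + 1 + (rest.length : Int) by
        push_cast; ring]
      rw [hih]
      congr 2
      omega
    · have hih := ih (k + 1) k (by omega)
      rw [show ((k : Int) + 1 - k - 1) = 0 by omega] at hih
      simp only [pvCorrIdx, hb, Bool.false_eq_true, if_false, pvTrueRuns, List.length_cons,
        List.cons_append]
      rw [show ((k : Int) + ((rest.length : Nat) + 1 : Nat)) = k + 1 + (rest.length : Int) by
        push_cast; ring]
      rw [pvGapsOf_cons_cons]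
      obtain ⟨y, r, hy⟩ := pvGapsOf_cons_append k (k + 1 + (rest.length : Int))
        (pvCorrIdx rest (k + 1))
      rw [hy, pvMaxList_cons_cons, ← hy, hih]
      by_cases h : k - last - 1 = 0
      · rw [h, if_pos rfl, List.nil_append]
        exact max_eq_right (pvInitLeFoldlMax _ _)
      · rw [if_neg h, List.foldl_append, List.foldl_cons, List.foldl_nil,
          max_comm (0 : Int) (k - last - 1), pvFoldlMaxMax]

-- the port's bounds list is the sentinel-prefixed recursive index list
theorem pvBoundsEq (ar : List (List (String × Bool))) :
    (PySem.List.enumerate ar).foldl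
        (fun acc p => if pvIsCorrect p.2 then acc ++ [p.1] else acc) [(-1 : Int)]
      = -1 :: pvCorrIdx (ar.map (fun a => !(pvIsCorrect a))) 0 := by
  suffices h : ∀ (l : List (List (String × Bool))) (k : Int) (acc : List Int),
      (PySem.List.enumerate l k).foldl
          (fun acc p => if pvIsCorrect p.2 then acc ++ [p.1] else acc) acc
        = acc ++ pvCorrIdx (l.map (fun a => !(pvIsCorrect a))) k by
    simpa using h ar 0 [(-1 : Int)]
  intro l
  induction l with
  | nil => simp [PySem.List.enumerate_nil, pvCorrIdx]
  | cons x xs ih =>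
    intro k acc
    by_cases hc : pvIsCorrect x
    · simp [PySem.List.enumerate_cons, pvCorrIdx, hc, ih]
    · simp [PySem.List.enumerate_cons, pvCorrIdx, hc, ih]

-- ===== VERDICT (by name: the statement is the Claim_ definition above) =====
theorem calculate_streak_penalty_spec : Claim_equal_calculate_streak_penalty := by
  intro answer_record _
  have hA := pvLoopEq (answer_record.map (fun a => !(pvIsCorrect a))) 0 0 le_rfl le_rfl
  rw [List.foldl_map] at hA
  have hB := pvGapEq (answer_record.map (fun a => !(pvIsCorrect a))) 0 (-1) (by omega)
  rw [show ((0 : Int) - (-1) - 1) = 0 by omega] at hB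
  simp only [List.length_map] at hB
  rw [show ((0 : Int) + (answer_record.length : Int)) = (answer_record.length : Int) by omega] at hB
  simp only [Spec_calculate_streak_penalty, calculate_streak_penalty, calculate_streak_penalty_alt,
    pvBoundsEq, List.cons_append, Bool.not_eq_true'] at *
  rw [hA, ← hB]
  simp only [pvMaxList, pvGapsOf]
  split_ifs <;> omega
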